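-- pv_equiv track=rewrite | github.com/chowchunfu/Polybridge3 | TrussCalculator/IterateNodes.py | GetIteratedNodes
-- ===== SOURCE A (Python) =====
-- def GetRecursivelyTweakedNodes(n,Layers,TweakData,RecursivelyTweakedNodes,TweakedNodes):
--         if n == Layers:
--             RecursivelyTweakedNodes += TweakedNodes
--         else:
--             Xrange = TweakData[n][1]
--             Yrange = TweakData[n][2]
--             for x in Xrange:
--                 for y in Yrange:
--                     TweakedNodes[n] = (x,y)
--                     GetRecursivelyTweakedNodes(n+1,Layers,TweakData,RecursivelyTweakedNodes,TweakedNodes)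
--
-- def GetIteratedNodes(TweakData):
--     Layers = len(TweakData)
--     TweakedNodes = []
--     for i in range(Layers):
--         TweakedNodes.append((0,0))
--
--     RecursivelyTweakedNodes = []
--     GetRecursivelyTweakedNodes(0,Layers,TweakData,RecursivelyTweakedNodes,TweakedNodes)
--     NumberOfData = int(len(RecursivelyTweakedNodes) / Layers)
--
--     IteratedNodes = {} #Tidy Data
--     for DataID in range(1,NumberOfData+1):
--         IteratedNodes[DataID] = {}
--         for n in range(Layers):
--             Node = TweakData[n][0]
--             Coord = RecursivelyTweakedNodes[Layers*DataID-Layers+n]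
--             IteratedNodes[DataID][Node] = Coord
--
--     return IteratedNodes
-- ===== SOURCE B (Python) =====
-- def GetIteratedNodes(TweakData):
--     combos = [()]
--     for _, Xrange, Yrange in TweakData:
--         combos = [c + ((x, y),) for c in combos for x in Xrange for y in Yrange]
--     names = [layer[0] for layer in TweakData]
--     return {i: dict(zip(names, c)) for i, c in enumerate(combos, 1)}
-- ===== Notes on version B (the rewrite author's own statement) =====
-- stated objective: simpler
-- what changed: Replaces the in-place-mutating recursion plus flat-list index arithmetic with an iterative Cartesian-product build of per-layer (x,y) combos, then a dict comprehension zipping layer names with each combo, enumerated from 1.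
-- outside the precondition, e.g. on GetIteratedNodes([]): A raises ZeroDivisionError, B returns {1: {}}
import Mathlib
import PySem

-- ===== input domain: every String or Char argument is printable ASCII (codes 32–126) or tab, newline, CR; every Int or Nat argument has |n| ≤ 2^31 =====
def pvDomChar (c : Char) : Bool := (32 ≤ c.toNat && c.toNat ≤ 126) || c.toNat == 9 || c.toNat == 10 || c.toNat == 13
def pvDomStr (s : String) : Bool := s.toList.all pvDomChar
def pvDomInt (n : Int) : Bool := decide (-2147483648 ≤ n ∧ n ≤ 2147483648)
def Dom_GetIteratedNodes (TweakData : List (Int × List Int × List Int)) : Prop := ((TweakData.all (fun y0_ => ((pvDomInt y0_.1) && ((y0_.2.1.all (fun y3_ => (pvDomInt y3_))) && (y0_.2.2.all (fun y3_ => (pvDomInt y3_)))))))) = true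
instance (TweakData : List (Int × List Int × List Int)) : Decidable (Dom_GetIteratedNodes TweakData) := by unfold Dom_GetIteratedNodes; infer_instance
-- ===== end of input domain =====

-- B replaces A's mutating recursion + flat-list index arithmetic by an iterative
-- Cartesian-product build and a zip-based dict comprehension (objective: simpler).

-- ===== PORT A =====
-- GetRecursivelyTweakedNodes: the two mutated lists become threaded state
-- (RecursivelyTweakedNodes, TweakedNodes); fuel ≥ Layers - n + 1 only makes the
-- recursion total, every admitted call has enough fuel.
def pvRecTweak : Nat → Nat → Nat → List (Int × List Int × List Int) →
    List (Int × Int) → List (Int × Int) → List (Int × Int) × List (Int × Int)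
  | 0, _, _, _, acc, tw => (acc, tw)
  | fuel + 1, n, Layers, TweakData, acc, tw =>
    if n = Layers then (acc ++ tw, tw)
    else
      let Xrange := (TweakData.getD n (0, [], [])).2.1
      let Yrange := (TweakData.getD n (0, [], [])).2.2
      Xrange.foldl (fun st x =>
        Yrange.foldl (fun st y =>
          pvRecTweak fuel (n + 1) Layers TweakData st.1 (st.2.set n (x, y))) st) (acc, tw)

def GetIteratedNodes (TweakData : List (Int × List Int × List Int)) : List (Int × List (Int × Int × Int)) :=
  let Layers := TweakData.length
  let TweakedNodes := (List.range Layers).foldl (fun t _ => t ++ [((0 : Int), (0 : Int))]) []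
  let RecursivelyTweakedNodes := (pvRecTweak (Layers + 1) 0 Layers TweakData [] TweakedNodes).1
  let NumberOfData : Int := PySem.Int.truncdiv (RecursivelyTweakedNodes.length : Int) (Layers : Int)
  let IteratedNodes : PySem.Dict Int (PySem.Dict Int (Int × Int)) :=
    (PySem.List.pyRange 1 (NumberOfData + 1)).foldl (fun d DataID =>
      d.insert DataID
        ((PySem.List.pyRange 0 (Layers : Int)).foldl (fun d2 n =>
          let Node := (PySem.List.pyGetD TweakData n (0, [], [])).1
          let Coord := PySem.List.pyGetD RecursivelyTweakedNodes
            ((Layers : Int) * DataID - (Layers : Int) + n) ((0 : Int), (0 : Int))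
          d2.insert Node Coord) PySem.Dict.empty)) PySem.Dict.empty
  IteratedNodes.items.map (fun p => (p.1, p.2.items))

-- ===== PORT B =====
def GetIteratedNodes_alt (TweakData : List (Int × List Int × List Int)) : List (Int × List (Int × Int × Int)) :=
  let combos := TweakData.foldl (fun cs t =>
    cs.flatMap (fun c => t.2.1.flatMap (fun x => t.2.2.map (fun y => c ++ [(x, y)])))) [[]]
  let names := TweakData.map (·.1)
  (PySem.List.enumerate combos 1).map (fun ic =>
    (ic.1, ((names.zip ic.2).foldl (fun d p => d.insert p.1 p.2) PySem.Dict.empty).items))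

-- ===== PRECONDITION & SPEC =====
-- A raises ZeroDivisionError (int(0/0)) on empty TweakData, where B would return [(1, [])];
-- Pre_ excludes exactly that input.
def Pre_GetIteratedNodes (TweakData : List (Int × List Int × List Int)) : Prop := TweakData ≠ []
instance (TweakData : List (Int × List Int × List Int)) : Decidable (Pre_GetIteratedNodes TweakData) := by unfold Pre_GetIteratedNodes; infer_instance
def pvWitness_GetIteratedNodes : (List (Int × List Int × List Int)) := [(1, [1, 2], [3])]

def Spec_GetIteratedNodes (TweakData : List (Int × List Int × List Int)) (out : List (Int × List (Int × Int × Int))) : Prop := out = GetIteratedNodes_alt TweakData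
instance (TweakData : List (Int × List Int × List Int)) (out : List (Int × List (Int × Int × Int))) : Decidable (Spec_GetIteratedNodes TweakData out) := by unfold Spec_GetIteratedNodes; infer_instance

-- ===== CLAIM (what is proved, stated in full; the proofs are below) =====
def Claim_equal_GetIteratedNodes : Prop := ∀ (TweakData : List (Int × List Int × List Int)), Dom_GetIteratedNodes TweakData → Pre_GetIteratedNodes TweakData → Spec_GetIteratedNodes TweakData (GetIteratedNodes TweakData)

-- ===== LEMMAS AND PROOFS =====

-- ordered (x, y) pairs of one layer
def pvPairs (t : Int × List Int × List Int) : List (Int × Int) :=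
  t.2.1.flatMap (fun x => t.2.2.map (fun y => (x, y)))

-- right-fold Cartesian product (last layer varies fastest)
def pvProd (ls : List (List (Int × Int))) : List (List (Int × Int)) :=
  ls.foldr (fun l acc => l.flatMap (fun p => acc.map (p :: ·))) [[]]

lemma pvProd_nil : pvProd [] = [[]] := rfl

lemma pvProd_cons (l : List (Int × Int)) (ls : List (List (Int × Int))) :
    pvProd (l :: ls) = l.flatMap (fun p => (pvProd ls).map (p :: ·)) := rfl

lemma pvProd_length_mem (ls : List (List (Int × Int))) (c : List (Int × Int))
    (hc : c ∈ pvProd ls) : c.length = ls.length := by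
  induction ls generalizing c with
  | nil => simp [pvProd_nil] at hc; simp [hc]
  | cons l ls ih =>
    rw [pvProd_cons] at hc
    simp only [List.mem_flatMap, List.mem_map] at hc
    obtain ⟨p, _, c', hc', rfl⟩ := hc
    simp [ih c' hc']

-- B's iterative build equals the right-fold product
lemma pvBuild_eq (TD : List (Int × List Int × List Int)) (css : List (List (Int × Int))) :
    TD.foldl (fun cs t =>
      cs.flatMap (fun c => t.2.1.flatMap (fun x => t.2.2.map (fun y => c ++ [(x, y)])))) css
      = css.flatMap (fun c => (pvProd (TD.map pvPairs)).map (fun s => c ++ s)) := by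
  induction TD generalizing css with
  | nil => simp [pvProd_nil]
  | cons t TD ih =>
    simp only [List.foldl_cons, ih, List.map_cons, pvProd_cons]
    simp only [pvPairs, List.flatMap_assoc, List.map_flatMap, List.flatMap_map, List.map_map,
      Function.comp_def]
    simp [List.append_assoc]

lemma take_set_succ {α : Type} (xs : List α) (n : Nat) (a : α) (h : n < xs.length) :
    (xs.set n a).take (n + 1) = xs.take n ++ [a] := by
  rw [List.take_add_one]
  simp [h, List.take_set]
  exact List.set_eq_of_length_le (by simp)

-- the block contributed by choosing pair p at layer n (prefix t0 below the layer)
def pvBlock (TD : List (Int × List Int × List Int)) (n : Nat) (t0 : List (Int × Int))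
    (p : Int × Int) : List (Int × Int) :=
  ((pvProd ((TD.drop (n + 1)).map pvPairs)).map (fun c => t0 ++ p :: c)).flatten

-- main invariant of A's recursion
lemma pvRecTweak_spec (TD : List (Int × List Int × List Int)) :
    ∀ fuel n acc tw, n ≤ TD.length → tw.length = TD.length → TD.length - n < fuel →
    ∃ tw', pvRecTweak fuel n TD.length TD acc tw
        = (acc ++ ((pvProd ((TD.drop n).map pvPairs)).map (fun c => tw.take n ++ c)).flatten, tw')
      ∧ tw'.length = TD.length ∧ tw'.take n = tw.take n := by
  intro fuel
  induction fuel with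
  | zero => intro n acc tw _ _ h; omega
  | succ fuel ih =>
    intro n acc tw hn htw hfuel
    by_cases hEq : n = TD.length
    · subst hEq
      refine ⟨tw, ?_, htw, rfl⟩
      simp [pvRecTweak, pvProd_nil, List.take_of_length_le (le_of_eq htw)]
    · have hlt : n < TD.length := lt_of_le_of_ne hn hEq
      have hdrop : TD.drop n = TD[n] :: TD.drop (n + 1) := List.drop_eq_getElem_cons hlt
      -- the double foldl over Xrange, Yrange is a foldl over pvPairs TD[n]
      have hfold : ∀ (init : List (Int × Int) × List (Int × Int)),
          pvRecTweak (fuel + 1) n TD.length TD init.1 init.2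
            = (pvPairs TD[n]).foldl
                (fun st p => pvRecTweak fuel (n + 1) TD.length TD st.1 (st.2.set n p)) init := by
        intro init
        simp only [pvRecTweak, if_neg hEq, List.getD_eq_getElem?_getD,
          List.getElem?_eq_getElem hlt, Option.getD_some, pvPairs, List.foldl_flatMap,
          List.foldl_map]
      -- inner loop lemma, by induction over the pair list
      have inner : ∀ (ps : List (Int × Int)) (st : List (Int × Int) × List (Int × Int)),
          st.2.length = TD.length → st.2.take n = tw.take n →
          ∃ tw', ps.foldl (fun st p => pvRecTweak fuel (n + 1) TD.length TD st.1 (st.2.set n p)) st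
              = (st.1 ++ (ps.map (pvBlock TD n (tw.take n))).flatten, tw')
            ∧ tw'.length = TD.length ∧ tw'.take n = tw.take n := by
        intro ps
        induction ps with
        | nil => intro st h1 h2; exact ⟨st.2, by simp, h1, h2⟩
        | cons p ps ihp =>
          intro st h1 h2
          have hset : (st.2.set n p).length = TD.length := by simpa using h1
          obtain ⟨tw1, heq1, hlen1, htake1⟩ :=
            ih (n + 1) st.1 (st.2.set n p) hlt hset (by omega)
          have htk : (st.2.set n p).take (n + 1) = tw.take n ++ [p] := by
            rw [take_set_succ st.2 n p (by omega), h2]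
          have heq1' : pvRecTweak fuel (n + 1) TD.length TD st.1 (st.2.set n p)
              = (st.1 ++ pvBlock TD n (tw.take n) p, tw1) := by
            rw [heq1, htk]
            simp [pvBlock, List.append_assoc]
          have htake1' : tw1.take n = tw.take n := by
            have h5 : tw1.take n = (tw1.take (n + 1)).take n := by
              rw [List.take_take]; congr 1; omega
            rw [h5, htake1, htk, List.take_append_of_le_length (by
              simp [List.length_take]; omega)]
            rw [List.take_take]
            congr 1; omega
          obtain ⟨tw', heq2, hlen2, htake2⟩ :=
            ihp (st.1 ++ pvBlock TD n (tw.take n) p, tw1) hlen1 htake1'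
          refine ⟨tw', ?_, hlen2, htake2⟩
          rw [List.foldl_cons, heq1', heq2]
          simp [List.append_assoc]
      obtain ⟨tw', heq, hlen, htake⟩ := inner (pvPairs TD[n]) (acc, tw) htw rfl
      refine ⟨tw', ?_, hlen, htake⟩
      rw [hfold (acc, tw)]
      simp only at heq
      rw [heq]
      congr 1
      rw [hdrop]
      simp only [List.map_cons, pvProd_cons, List.flatMap_def]
      rw [List.map_flatten, List.flatten_flatten]
      congr 1
      refine congrArg List.flatten ?_
      rw [List.map_map, List.map_map]
      apply List.map_congr_left
      intro p _
      simp [pvBlock, List.map_drop, List.map_map, Function.comp_def]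

-- index into a flattening of uniform-length blocks
lemma flatten_getD (L : Nat) :
    ∀ (cs : List (List (Int × Int))) (k nn : Nat), (∀ c ∈ cs, c.length = L) → k < cs.length → nn < L →
    cs.flatten.getD (L * k + nn) ((0 : Int), (0 : Int))
      = (cs.getD k []).getD nn ((0 : Int), (0 : Int)) := by
  intro cs
  induction cs with
  | nil => intro k nn _ hk; simp at hk
  | cons c cs ihc =>
    intro k nn hlen hk hnn
    have hc : c.length = L := hlen c (by simp)
    cases k with
    | zero =>
      simp only [Nat.mul_zero, Nat.zero_add, List.flatten_cons, List.getD]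
      rw [List.getElem?_append_left (by omega)]
      simp
    | succ k =>
      have hsplit : L * (k + 1) + nn = c.length + (L * k + nn) := by rw [hc]; ring
      rw [List.flatten_cons, List.getD_eq_getElem?_getD, hsplit,
        List.getElem?_append_right (by omega), Nat.add_sub_cancel_left, List.getD_cons_succ,
        ← List.getD_eq_getElem?_getD]
      exact ihc k nn (fun c' h => hlen c' (by simp [h]))
        (by simp only [List.length_cons] at hk; omega) hnn

-- A's inner index loop builds the same dict as B's zip fold
lemma inner_zip (TD : List (Int × List Int × List Int)) :
    ∀ (combo : List (Int × Int)) (d : PySem.Dict Int (Int × Int)), combo.length = TD.length →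
    (List.range TD.length).foldl (fun d2 nn =>
        d2.insert (TD.getD nn (0, [], [])).1 (combo.getD nn ((0 : Int), (0 : Int)))) d
      = ((TD.map (·.1)).zip combo).foldl (fun d p => d.insert p.1 p.2) d := by
  induction TD with
  | nil => intro combo d _; simp
  | cons t TD ihz =>
    intro combo d hlen
    cases combo with
    | nil => simp at hlen
    | cons p combo =>
      simp only [List.length_cons, List.range_succ_eq_map, List.foldl_cons, List.foldl_map,
        List.map_cons, List.zip_cons_cons]
      simpa using ihz combo (d.insert t.1 p) (by simpa using hlen)

-- enumerate as a map over indices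
lemma enumerate_map_eq {β : Type} (g : Int × List (Int × Int) → β) :
    ∀ (cs : List (List (Int × Int))) (s : Int),
    (PySem.List.enumerate cs s).map g
      = (List.range cs.length).map (fun (k : Nat) => g (s + (k : Int), cs.getD k [])) := by
  intro cs
  induction cs with
  | nil => intro s; rfl
  | cons c cs ihe =>
    intro s
    simp only [PySem.List.enumerate_cons, List.map_cons, List.length_cons,
      List.range_succ_eq_map, List.map_map, ihe (s + 1)]
    refine List.cons_eq_cons.mpr ⟨by simp, ?_⟩
    apply List.map_congr_left
    intro k _
    simp only [Function.comp]
    have hs : s + 1 + (k : Int) = s + ((k : Nat) + 1 : Nat) := by push_cast; ring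
    rw [hs]
    rfl

lemma flatten_length_uniform (L : Nat) :
    ∀ cs : List (List (Int × Int)), (∀ c ∈ cs, c.length = L) →
    cs.flatten.length = cs.length * L := by
  intro cs
  induction cs with
  | nil => simp
  | cons c cs ihl =>
    intro h
    simp only [List.flatten_cons, List.length_append, List.length_cons, Nat.succ_mul,
      ihl (fun c' hc' => h c' (by simp [hc'])), h c (by simp)]
    ring

-- ===== VERDICT (by name: the statement is the Claim_ definition above) =====
theorem GetIteratedNodes_spec : Claim_equal_GetIteratedNodes := by
  intro TD _ hpre
  unfold Spec_GetIteratedNodes GetIteratedNodes GetIteratedNodes_alt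
  dsimp only
  have hL : 0 < TD.length := List.length_pos_iff.mpr hpre
  have htw0 : (List.range TD.length).foldl (fun t _ => t ++ [((0 : Int), (0 : Int))]) []
      = (List.range TD.length).map (fun _ => ((0 : Int), (0 : Int))) :=
    PySem.List.foldl_append_singleton_eq_map _ _ []
  obtain ⟨tw', heq, -, -⟩ := pvRecTweak_spec TD (TD.length + 1) 0 []
    ((List.range TD.length).foldl (fun t _ => t ++ [((0 : Int), (0 : Int))]) [])
    (Nat.zero_le _) (by rw [htw0]; simp) (by omega)
  have hflat : (pvRecTweak (TD.length + 1) 0 TD.length TD []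
      ((List.range TD.length).foldl (fun t _ => t ++ [((0 : Int), (0 : Int))]) [])).1
      = (pvProd (TD.map pvPairs)).flatten := by
    rw [heq]; simp
  rw [hflat, pvBuild_eq TD [[]]]
  simp only [List.flatMap_cons, List.flatMap_nil, List.nil_append, List.append_nil, List.map_id']
  set combos := pvProd (TD.map pvPairs) with hcombos
  have hcl : ∀ c ∈ combos, c.length = TD.length := fun c hc => by
    simpa using pvProd_length_mem _ c hc
  have hflen : combos.flatten.length = combos.length * TD.length :=
    flatten_length_uniform TD.length combos hcl
  -- NumberOfData is the number of combos
  have hN : PySem.Int.truncdiv (combos.flatten.length : Int) (TD.length : Int)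
      = (combos.length : Int) := by
    rw [hflen, PySem.Int.truncdiv]
    push_cast
    rw [Int.mul_tdiv_cancel _ (by exact_mod_cast hL.ne')]
  rw [hN]
  -- outer dict: the DataIDs are fresh distinct keys, so its items list is a map
  have houter := PySem.Dict.items_foldl_insert_fresh
    (PySem.List.pyRange 1 ((combos.length : Int) + 1)) (fun i => i)
    (fun DataID =>
      (PySem.List.pyRange 0 (TD.length : Int)).foldl
        (fun d2 n =>
          d2.insert (PySem.List.pyGetD TD n (0, [], [])).1
            (PySem.List.pyGetD combos.flatten
              ((TD.length : Int) * DataID - (TD.length : Int) + n) ((0 : Int), (0 : Int))))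
        PySem.Dict.empty)
    PySem.Dict.empty
    (fun a _ => PySem.Dict.contains_empty a)
    (by simpa using PySem.List.nodup_pyRange_one 1 ((combos.length : Int) + 1))
  rw [houter]
  have hempty : (PySem.Dict.empty : PySem.Dict Int (PySem.Dict Int (Int × Int))).items = [] := rfl
  rw [hempty, List.nil_append, List.map_map]
  -- both sides as maps over List.range combos.length
  rw [enumerate_map_eq _ combos 1]
  have hrange : PySem.List.pyRange 1 ((combos.length : Int) + 1)
      = (List.range combos.length).map (fun (k : Nat) => 1 + (k : Int)) := by
    rw [PySem.List.pyRange_one,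
      show ((combos.length : Int) + 1 - 1).toNat = combos.length from by omega]
  rw [hrange, List.map_map]
  apply List.map_congr_left
  intro k hk
  have hkm : k < combos.length := List.mem_range.mp hk
  simp only [Function.comp]
  have hmem : combos.getD k [] ∈ combos := by
    rw [List.getD_eq_getElem combos [] hkm]; exact List.getElem_mem hkm
  have hcombok : (combos.getD k []).length = TD.length := hcl _ hmem
  have hinner :
      (PySem.List.pyRange 0 (TD.length : Int)).foldl
        (fun d2 n =>
          d2.insert (PySem.List.pyGetD TD n (0, [], [])).1
            (PySem.List.pyGetD combos.flatten
              ((TD.length : Int) * (1 + (k : Int)) - (TD.length : Int) + n) ((0 : Int), (0 : Int))))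
        PySem.Dict.empty
      = ((TD.map (·.1)).zip (combos.getD k [])).foldl
          (fun d p => d.insert p.1 p.2) PySem.Dict.empty := by
    rw [← inner_zip TD (combos.getD k []) PySem.Dict.empty hcombok,
      PySem.List.pyRange_zero_natCast TD.length, List.foldl_map]
    apply PySem.List.foldl_congr_mem
    intro d2 nn hnn
    have hnnL : nn < TD.length := List.mem_range.mp hnn
    have hidx : (TD.length : Int) * (1 + (k : Int)) - (TD.length : Int) + (nn : Int)
        = ((TD.length * k + nn : Nat) : Int) := by push_cast; ring
    rw [hidx, PySem.List.pyGetD_natCast, PySem.List.pyGetD_natCast,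
      flatten_getD TD.length combos k nn hcl hkm hnnL]
  rw [hinner]
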